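-- pv_equiv track=rewrite | github.com/pypi-data/pypi-mirror-139 | packages/fridrich/fridrich-1.0.2-py3-none-any.whl/fridrich/backend/__init__.py | calculate_streak
-- ===== SOURCE A (Python) =====
-- def calculate_streak(log: dict) -> tuple[str, int]:
--     """
--     if someone got voted multiple times in a row,
--     return their name and how often they
--     got voted
--     :return: (Name, Streak)
--     """
--     # sort list by year, month, date
--     sorted_log = {x: log[x] for x in sorted(log, key=lambda x: '.'.join(reversed(x.split('.'))))}
--     try:
--         streak_guys: dict = {guy: 0 for guy in sorted_log[list(sorted_log.keys())[-1]].split("|")}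
--     except AttributeError:
--         raise ValueError("Please only pass one voting per time")
--
--     for guy in streak_guys.keys():
--         for date in reversed(sorted_log.keys()):
--             if guy in sorted_log[date] and streak_guys[guy] != -1:
--                 streak_guys[guy] += 1
--                 continue
--             break
--
--     max_num = max(list(streak_guys.values()))
--     names = "|".join([guy for guy in streak_guys if streak_guys[guy] == max_num])
--     return names, max_num  # return results
-- ===== SOURCE B (Python) =====
-- def calculate_streak(log: dict) -> tuple[str, int]:
--     """
--     if someone got voted multiple times in a row,
--     return their name and how often they
--     got voted
--     :return: (Name, Streak)
--     """
--     # sort dates by year, month, day (same key as before)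
--     dates = sorted(log, key=lambda x: '.'.join(reversed(x.split('.'))))
--     try:
--         candidates = list(dict.fromkeys(log[dates[-1]].split("|")))
--     except AttributeError:
--         raise ValueError("Please only pass one voting per time")
--
--     counts = dict.fromkeys(candidates, 0)
--     active = candidates
--     # one backward pass over the dates: a candidate stays active while it
--     # keeps appearing (substring test), and drops out forever otherwise
--     for date in reversed(dates):
--         if not active:
--             break
--         value = log[date]
--         still = []
--         for guy in active:
--             if guy in value:
--                 counts[guy] += 1
--                 still.append(guy)
--         active = still
--
--     max_num = max(counts.values())
--     names = "|".join(guy for guy in counts if counts[guy] == max_num)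
--     return names, max_num
-- ===== Notes on version B (the rewrite author's own statement) =====
-- stated objective: alternative
-- what changed: Replaces A's candidate-major nested rescans (one full backward pass over the dates per candidate) by a single backward pass over the sorted dates that keeps all candidates' counts and a shrinking active set with an early exit once no candidate is still on a streak.
-- outside the precondition, e.g. on calculate_streak({}): A raises IndexError, B raises IndexError
import Mathlib
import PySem

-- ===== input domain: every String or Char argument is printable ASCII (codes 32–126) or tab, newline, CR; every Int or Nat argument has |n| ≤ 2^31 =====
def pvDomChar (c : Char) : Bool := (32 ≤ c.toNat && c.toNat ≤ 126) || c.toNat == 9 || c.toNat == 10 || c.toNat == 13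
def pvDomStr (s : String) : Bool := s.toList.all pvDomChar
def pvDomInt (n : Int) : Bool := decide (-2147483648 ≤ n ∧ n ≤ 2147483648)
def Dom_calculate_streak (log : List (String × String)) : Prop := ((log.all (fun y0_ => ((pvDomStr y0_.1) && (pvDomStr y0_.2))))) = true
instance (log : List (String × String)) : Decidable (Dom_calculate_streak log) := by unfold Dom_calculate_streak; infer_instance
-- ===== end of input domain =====

-- B re-decomposes A's per-candidate rescans into ONE backward pass over the sorted
-- dates with a set of still-active candidates (early exit when none remain); same
-- return value, alternative decomposition.

-- sort key: '.'.join(reversed(x.split('.')))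
def pvKeyFn (x : String) : String :=
  PySem.Str.join "." ((PySem.Str.split? x ".").getD []).reverse

-- ===== PORT A =====
-- inner 'for date in reversed(...): if guy in … and streak != -1: … else: break'
def pvAInner (sd : PySem.Dict String String) (g : String)
    (d : PySem.Dict String Int) : List String → PySem.Dict String Int
  | [] => d
  | date :: rest =>
    if PySem.Str.isIn g (sd.getD date "") && (d.getD g 0 != -1) then
      pvAInner sd g (d.insert g (d.getD g 0 + 1)) rest
    else d

def calculate_streak (log : List (String × String)) : String × Int :=
  let logd := PySem.Dict.ofList log
  let sortedKeys := PySem.List.sorted logd.keys pvKeyFn false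
  -- sorted_log = {x: log[x] for x in sortedKeys}; x is a key of logd, so getD never hits the default
  let sorted_log := sortedKeys.foldl (fun d x => d.insert x (logd.getD x "")) PySem.Dict.empty
  match PySem.List.pyGet? sorted_log.keys (-1) with   -- IndexError on empty log: excluded by Pre_
  | none => ("", 0)
  | some lastKey =>
    -- values are Strings here, so the AttributeError branch of A is unreachable in the typed port
    let guys := (PySem.Str.split? (sorted_log.getD lastKey "") "|").getD []   -- sep "|" ≠ "": never none
    let d0 := guys.foldl (fun d g => d.insert g (0 : Int)) PySem.Dict.empty
    let revKeys := sorted_log.keys.reverse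
    let dF := d0.keys.foldl (fun d g => pvAInner sorted_log g d revKeys) d0
    let max_num := match PySem.List.max? dF.values (fun v => v) with   -- guys ≠ [], so never none
      | some m => m
      | none => 0
    (PySem.Str.join "|" (dF.keys.filter (fun g => dF.getD g 0 == max_num)), max_num)

-- ===== PORT B =====
def pvBStep (val : String) (p : PySem.Dict String Int × List String) (g : String) :
    PySem.Dict String Int × List String :=
  if PySem.Str.isIn g val then (p.1.insert g (p.1.getD g 0 + 1), p.2 ++ [g]) else p

def pvBLoop (sd : PySem.Dict String String) (counts : PySem.Dict String Int)
    (active : List String) : List String → PySem.Dict String Int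
  | [] => counts
  | date :: rest =>
    if active.isEmpty then counts   -- 'if not active: break'
    else
      let p := active.foldl (pvBStep (sd.getD date "")) (counts, ([] : List String))
      pvBLoop sd p.1 p.2 rest

def calculate_streak_alt (log : List (String × String)) : String × Int :=
  let logd := PySem.Dict.ofList log
  let dates := PySem.List.sorted logd.keys pvKeyFn false
  match PySem.List.pyGet? dates (-1) with   -- IndexError on empty log: excluded by Pre_
  | none => ("", 0)
  | some lastKey =>
    let cand := PySem.List.dedup ((PySem.Str.split? (logd.getD lastKey "") "|").getD [])
    let counts0 := cand.foldl (fun d g => d.insert g (0 : Int)) PySem.Dict.empty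
    let counts := pvBLoop logd counts0 cand dates.reverse
    let max_num := match PySem.List.max? counts.values (fun v => v) with
      | some m => m
      | none => 0
    (PySem.Str.join "|" (counts.keys.filter (fun g => counts.getD g 0 == max_num)), max_num)

-- ===== PRECONDITION & SPEC =====
-- Pre_ excludes only the empty log, on which Python A raises IndexError.
def Pre_calculate_streak (log : List (String × String)) : Prop := log ≠ []
instance (log : List (String × String)) : Decidable (Pre_calculate_streak log) := by
  unfold Pre_calculate_streak; infer_instance

def pvWitness_calculate_streak : (List (String × String)) :=
  [("1.5.2022", "alice|bob"), ("2.5.2022", "alice")]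

def Spec_calculate_streak (log : List (String × String)) (out : String × Int) : Prop :=
  out = calculate_streak_alt log
instance (log : List (String × String)) (out : String × Int) :
    Decidable (Spec_calculate_streak log out) := by unfold Spec_calculate_streak; infer_instance

-- ===== CLAIM =====
def Claim_equal_calculate_streak : Prop :=
  ∀ (log : List (String × String)), Dom_calculate_streak log →
    Pre_calculate_streak log → Spec_calculate_streak log (calculate_streak log)

-- ===== LEMMAS AND PROOFS =====

-- streak length of g over a date list: consecutive prefix on which g occurs as a substring
def pvLen (sd : PySem.Dict String String) (g : String) (dates : List String) : Int :=
  ((dates.takeWhile (fun t => PySem.Str.isIn g (sd.getD t ""))).length : Int)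

lemma pvAInner_getD_self (sd : PySem.Dict String String) (g : String) :
    ∀ (dates : List String) (d : PySem.Dict String Int), 0 ≤ d.getD g 0 →
      (pvAInner sd g d dates).getD g 0 = d.getD g 0 + pvLen sd g dates := by
  intro dates
  induction dates with
  | nil => intro d _; simp [pvAInner, pvLen]
  | cons date rest ih =>
    intro d hd
    rw [pvAInner]
    by_cases h : PySem.Str.isIn g (sd.getD date "") = true
    · have hne : (d.getD g 0 != -1) = true := by
        simp only [bne_iff_ne, ne_eq]; omega
      rw [if_pos (by rw [h, hne]; rfl)]
      rw [ih _ (by rw [PySem.Dict.getD_insert_self]; omega), PySem.Dict.getD_insert_self]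
      have hlen : pvLen sd g (date :: rest) = 1 + pvLen sd g rest := by
        simp only [pvLen, List.takeWhile_cons, h, if_true, List.length_cons]
        push_cast; ring
      rw [hlen]; ring
    · have h' : PySem.Str.isIn g (sd.getD date "") = false := by
        simpa using h
      rw [if_neg (by rw [h']; simp)]
      have hlen : pvLen sd g (date :: rest) = 0 := by
        simp only [pvLen, List.takeWhile_cons, h']
        simp
      rw [hlen]; ring

lemma pvAInner_getD_ne (sd : PySem.Dict String String) (g x : String) (hx : x ≠ g) :
    ∀ (dates : List String) (d : PySem.Dict String Int),
      (pvAInner sd g d dates).getD x 0 = d.getD x 0 := by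
  intro dates
  induction dates with
  | nil => intro d; simp [pvAInner]
  | cons date rest ih =>
    intro d
    rw [pvAInner]
    split
    · rw [ih, PySem.Dict.getD_insert_of_ne _ _ _ hx]
    · rfl

lemma pvAInner_keys (sd : PySem.Dict String String) (g : String) :
    ∀ (dates : List String) (d : PySem.Dict String Int), d.contains g = true →
      (pvAInner sd g d dates).keys = d.keys := by
  intro dates
  induction dates with
  | nil => intro d _; simp [pvAInner]
  | cons date rest ih =>
    intro d hc
    rw [pvAInner]
    split
    · rw [ih _ (by simp [PySem.Dict.contains_insert_self]),
        PySem.Dict.keys_insert_of_contains _ _ hc]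
    · rfl

lemma pvAFold (sd : PySem.Dict String String) (dates : List String) :
    ∀ (ks : List String) (d : PySem.Dict String Int), ks.Nodup →
      (∀ g ∈ ks, d.contains g = true) → (∀ g ∈ ks, d.getD g 0 = 0) →
      (ks.foldl (fun d g => pvAInner sd g d dates) d).keys = d.keys ∧
      ∀ x, (ks.foldl (fun d g => pvAInner sd g d dates) d).getD x 0 =
        if x ∈ ks then pvLen sd x dates else d.getD x 0 := by
  intro ks
  induction ks with
  | nil => intro d _ _ _; exact ⟨rfl, fun x => by simp⟩
  | cons g ks ih =>
    intro d hnd hc h0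
    have hgk : d.contains g = true := hc g (by simp)
    have hkeys : (pvAInner sd g d dates).keys = d.keys := pvAInner_keys sd g dates d hgk
    have hndk : ks.Nodup := (List.nodup_cons.mp hnd).2
    have hgnot : g ∉ ks := (List.nodup_cons.mp hnd).1
    have hc' : ∀ g' ∈ ks, (pvAInner sd g d dates).contains g' = true := by
      intro g' hg'
      rw [PySem.Dict.contains_iff_mem_keys, hkeys, ← PySem.Dict.contains_iff_mem_keys]
      exact hc g' (by simp [hg'])
    have h0' : ∀ g' ∈ ks, (pvAInner sd g d dates).getD g' 0 = 0 := by
      intro g' hg'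
      rw [pvAInner_getD_ne sd g g' (fun he => hgnot (he ▸ hg')) dates d]
      exact h0 g' (by simp [hg'])
    obtain ⟨ihk, ihg⟩ := ih (pvAInner sd g d dates) hndk hc' h0'
    refine ⟨by rw [List.foldl_cons, ihk, hkeys], ?_⟩
    intro x
    rw [List.foldl_cons, ihg x]
    by_cases hx : x ∈ ks
    · simp [hx]
    · by_cases hxg : x = g
      · subst hxg
        rw [pvAInner_getD_self sd x dates d (by rw [h0 x (by simp)]), h0 x (by simp)]
        simp [hx]
      · rw [pvAInner_getD_ne sd g x hxg dates d]
        simp [hx, hxg]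

lemma pvBRow (val : String) :
    ∀ (active : List String) (counts : PySem.Dict String Int) (still : List String),
      active.Nodup → (∀ g ∈ active, counts.contains g = true) →
      (active.foldl (pvBStep val) (counts, still)).2
          = still ++ active.filter (fun g => PySem.Str.isIn g val) ∧
      (active.foldl (pvBStep val) (counts, still)).1.keys = counts.keys ∧
      ∀ x, (active.foldl (pvBStep val) (counts, still)).1.getD x 0 =
        counts.getD x 0 + (if x ∈ active ∧ PySem.Str.isIn x val then 1 else 0) := by
  intro active
  induction active with
  | nil => intro counts still _ _; exact ⟨by simp, rfl, fun x => by simp⟩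
  | cons g act ih =>
    intro counts still hnd hc
    have hgc : counts.contains g = true := hc g (by simp)
    have hnda : act.Nodup := (List.nodup_cons.mp hnd).2
    have hgnot : g ∉ act := (List.nodup_cons.mp hnd).1
    rw [List.foldl_cons]
    by_cases h : PySem.Str.isIn g val = true
    · have hC : PySem.Chars.isIn g.toList val.toList = true := by simpa using h
      have hstep : pvBStep val (counts, still) g
          = (counts.insert g (counts.getD g 0 + 1), still ++ [g]) := by
        rw [pvBStep, if_pos h]
      rw [hstep]
      have hc' : ∀ g' ∈ act, (counts.insert g (counts.getD g 0 + 1)).contains g' = true := by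
        intro g' hg'
        rw [PySem.Dict.contains_insert]
        rw [hc g' (by simp [hg'])]
        simp
      obtain ⟨ih2, ihk, ihg⟩ := ih (counts.insert g (counts.getD g 0 + 1)) (still ++ [g]) hnda hc'
      refine ⟨?_, ?_, ?_⟩
      · rw [ih2]; simp [hC]
      · rw [ihk, PySem.Dict.keys_insert_of_contains _ _ hgc]
      · intro x
        rw [ihg x, PySem.Dict.getD_insert]
        by_cases hxg : x = g
        · subst hxg
          simp [hC, hgnot]
        · simp only [if_neg hxg, List.mem_cons]
          by_cases hx : x ∈ act
          · simp [hx, hxg]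
          · simp [hx, hxg]
    · have hC : PySem.Chars.isIn g.toList val.toList = false := by simpa using h
      have hstep : pvBStep val (counts, still) g = (counts, still) := by
        rw [pvBStep, if_neg h]
      rw [hstep]
      obtain ⟨ih2, ihk, ihg⟩ := ih counts still hnda (fun g' hg' => hc g' (by simp [hg']))
      refine ⟨?_, ihk, ?_⟩
      · rw [ih2]; simp [hC]
      · intro x
        rw [ihg x]
        by_cases hxg : x = g
        · subst hxg; simp [hC, hgnot]
        · simp only [List.mem_cons]
          by_cases hx : x ∈ act
          · simp [hx, hxg]
          · simp [hx, hxg]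

lemma pvBLoop_spec (sd : PySem.Dict String String) :
    ∀ (dates : List String) (counts : PySem.Dict String Int) (active : List String),
      active.Nodup → (∀ g ∈ active, counts.contains g = true) →
      (pvBLoop sd counts active dates).keys = counts.keys ∧
      ∀ x, (pvBLoop sd counts active dates).getD x 0 =
        counts.getD x 0 + (if x ∈ active then pvLen sd x dates else 0) := by
  intro dates
  induction dates with
  | nil =>
    intro counts active _ _
    refine ⟨rfl, fun x => ?_⟩
    simp [pvBLoop, pvLen]
  | cons date rest ih =>
    intro counts active hnd hc
    rw [pvBLoop]
    by_cases hemp : active.isEmpty = true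
    · rw [if_pos hemp]
      have : active = [] := List.isEmpty_iff.mp hemp
      subst this
      exact ⟨rfl, fun x => by simp⟩
    · rw [if_neg hemp]
      obtain ⟨hrow2, hrowk, hrowg⟩ := pvBRow (sd.getD date "") active counts [] hnd hc
      have hfnd : (active.filter (fun g => PySem.Str.isIn g (sd.getD date ""))).Nodup :=
        hnd.filter _
      have hfc : ∀ g ∈ active.filter (fun g => PySem.Str.isIn g (sd.getD date "")),
          (active.foldl (pvBStep (sd.getD date "")) (counts, [])).1.contains g = true := by
        intro g hg
        rw [PySem.Dict.contains_iff_mem_keys, hrowk, ← PySem.Dict.contains_iff_mem_keys]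
        exact hc g (List.mem_of_mem_filter hg)
      obtain ⟨ihk, ihg⟩ := ih (active.foldl (pvBStep (sd.getD date "")) (counts, [])).1
        (active.foldl (pvBStep (sd.getD date "")) (counts, [])).2
        (by rw [hrow2]; simpa using hfnd)
        (by rw [hrow2]; simpa using hfc)
      refine ⟨by rw [ihk, hrowk], fun x => ?_⟩
      rw [ihg x, hrowg x, hrow2]
      simp only [List.nil_append]
      by_cases hx : x ∈ active
      · by_cases hin : PySem.Str.isIn x (sd.getD date "") = true
        · have hxf : x ∈ active.filter (fun g => PySem.Str.isIn g (sd.getD date "")) :=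
            List.mem_filter.mpr ⟨hx, hin⟩
          have hlen : pvLen sd x (date :: rest) = 1 + pvLen sd x rest := by
            simp only [pvLen, List.takeWhile_cons, hin, if_true, List.length_cons]
            push_cast; ring
          simp only [hx, hxf, hin, and_self, if_true, hlen]
          ring
        · have hin' : PySem.Str.isIn x (sd.getD date "") = false := by simpa using hin
          have hxf : x ∉ active.filter (fun g => PySem.Str.isIn g (sd.getD date "")) := by
            intro hmem
            exact hin (List.mem_filter.mp hmem).2
          have hlen : pvLen sd x (date :: rest) = 0 := by
            simp only [pvLen, List.takeWhile_cons, hin']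
            simp
          have hinC : PySem.Chars.isIn x.toList (sd.getD date "").toList = false := by
            simpa using hin
          simp [hx, hinC, hlen]
      · simp [hx]

-- a fold of inserts of fresh distinct keys from the empty dict, as an items list
lemma pvFoldDictItems {ν : Type} (ks : List String) (f : String → ν) (h : ks.Nodup) :
    (ks.foldl (fun (d : PySem.Dict String ν) x => d.insert x (f x)) PySem.Dict.empty).items
      = ks.map (fun k => (k, f k)) := by
  have := PySem.Dict.items_foldl_insert_fresh ks (fun a => a) f PySem.Dict.empty
    (fun a _ => PySem.Dict.contains_empty a) (by simpa using h)
  simpa using this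

lemma pvFoldZeroGetD : ∀ (gs : List String) (d : PySem.Dict String Int),
    (∀ x, d.getD x 0 = 0) →
    ∀ x, (gs.foldl (fun (d : PySem.Dict String Int) g => d.insert g (0 : Int)) d).getD x 0 = 0 := by
  intro gs
  induction gs with
  | nil => intro d hd x; exact hd x
  | cons g gs ih =>
    intro d hd x
    rw [List.foldl_cons]
    refine ih _ (fun y => ?_) x
    rw [PySem.Dict.getD_insert]
    split
    · rfl
    · exact hd y

lemma pvMainAux (logd : PySem.Dict String String) (hnd : logd.keys.Nodup) :
    (let sortedKeys := PySem.List.sorted logd.keys pvKeyFn false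
     let sorted_log := sortedKeys.foldl
       (fun (d : PySem.Dict String String) x => d.insert x (logd.getD x "")) PySem.Dict.empty
     match PySem.List.pyGet? sorted_log.keys (-1) with
     | none => (("", 0) : String × Int)
     | some lastKey =>
       let guys := (PySem.Str.split? (sorted_log.getD lastKey "") "|").getD []
       let d0 := guys.foldl (fun (d : PySem.Dict String Int) g => d.insert g (0 : Int))
         PySem.Dict.empty
       let revKeys := sorted_log.keys.reverse
       let dF := d0.keys.foldl (fun d g => pvAInner sorted_log g d revKeys) d0
       let max_num := match PySem.List.max? dF.values (fun v => v) with
         | some m => m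
         | none => 0
       (PySem.Str.join "|" (dF.keys.filter (fun g => dF.getD g 0 == max_num)), max_num))
    =
    (let dates := PySem.List.sorted logd.keys pvKeyFn false
     match PySem.List.pyGet? dates (-1) with
     | none => (("", 0) : String × Int)
     | some lastKey =>
       let cand := PySem.List.dedup ((PySem.Str.split? (logd.getD lastKey "") "|").getD [])
       let counts0 := cand.foldl (fun (d : PySem.Dict String Int) g => d.insert g (0 : Int))
         PySem.Dict.empty
       let counts := pvBLoop logd counts0 cand dates.reverse
       let max_num := match PySem.List.max? counts.values (fun v => v) with
         | some m => m
         | none => 0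
       (PySem.Str.join "|" (counts.keys.filter (fun g => counts.getD g 0 == max_num)), max_num)) := by
  dsimp only
  set sk := PySem.List.sorted logd.keys pvKeyFn false with hsk
  have hsknd : sk.Nodup := ((PySem.List.sorted_perm logd.keys pvKeyFn false).nodup_iff).mpr hnd
  set sl := sk.foldl (fun (d : PySem.Dict String String) x => d.insert x (logd.getD x ""))
    PySem.Dict.empty with hsl
  have hslitems : sl.items = sk.map (fun k => (k, logd.getD k "")) :=
    pvFoldDictItems sk (fun k => logd.getD k "") hsknd
  have hslkeys : sl.keys = sk := by
    have hcomp : ((fun p : String × String => p.1) ∘ fun k => (k, logd.getD k "")) = id := rfl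
    rw [PySem.Dict.keys, hslitems, List.map_map, hcomp, List.map_id]
  have hslgetD : ∀ x, sl.getD x "" = logd.getD x "" := by
    intro x
    by_cases hx : x ∈ sk
    · exact PySem.Dict.getD_of_mem_items sl
        (hslitems ▸ List.mem_map.mpr ⟨x, hx, rfl⟩) (hslkeys ▸ hsknd) ""
    · have h1 : sl.contains x = false := by
        cases hcon : sl.contains x
        · rfl
        · exact absurd (hslkeys ▸ (PySem.Dict.contains_iff_mem_keys sl x).mp hcon) hx
      have hx' : x ∉ logd.keys :=
        fun hm => hx (((PySem.List.sorted_perm logd.keys pvKeyFn false).mem_iff).mpr hm)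
      have h2 : logd.contains x = false := by
        cases hcon : logd.contains x
        · rfl
        · exact absurd ((PySem.Dict.contains_iff_mem_keys logd x).mp hcon) hx'
      rw [PySem.Dict.getD_of_not_contains _ _ h1, PySem.Dict.getD_of_not_contains _ _ h2]
  rw [hslkeys]
  cases hlk : PySem.List.pyGet? sk (-1) with
  | none => rfl
  | some lastKey =>
    simp only []
    rw [hslgetD lastKey]
    set guys := (PySem.Str.split? (logd.getD lastKey "") "|").getD [] with hguys
    set cand := PySem.List.dedup guys with hcand
    have hcandnd : cand.Nodup := PySem.List.nodup_dedup guys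
    -- A's initial dict
    set d0 := guys.foldl (fun (d : PySem.Dict String Int) g => d.insert g (0 : Int))
      PySem.Dict.empty with hd0
    have hd0keys : d0.keys = cand := by
      rw [hd0, PySem.Dict.keys_foldl_insert guys (fun _ _ => (0 : Int)) PySem.Dict.empty]
      rw [PySem.Dict.keys_empty]
      rw [hcand, PySem.List.dedup_eq_ofList]
      rfl
    have hd0getD : ∀ x, d0.getD x 0 = 0 :=
      pvFoldZeroGetD guys PySem.Dict.empty (fun x => PySem.Dict.getD_empty x 0)
    -- A's final dict
    obtain ⟨hAkeys, hAgetD⟩ := pvAFold sl sk.reverse d0.keys d0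
      (hd0keys ▸ hcandnd)
      (fun g hg => (PySem.Dict.contains_iff_mem_keys d0 g).mpr hg)
      (fun g _ => hd0getD g)
    rw [hd0keys] at hAkeys hAgetD
    -- B's initial dict
    set counts0 := cand.foldl (fun (d : PySem.Dict String Int) g => d.insert g (0 : Int))
      PySem.Dict.empty with hc0
    have hc0keys : counts0.keys = cand := by
      rw [hc0, PySem.Dict.keys_foldl_insert cand (fun _ _ => (0 : Int)) PySem.Dict.empty]
      rw [PySem.Dict.keys_empty]
      show PySem.Set.ofList cand = cand
      exact PySem.Set.ofList_eq_self_of_nodup cand hcandnd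
    have hc0getD : ∀ x, counts0.getD x 0 = 0 :=
      pvFoldZeroGetD cand PySem.Dict.empty (fun x => PySem.Dict.getD_empty x 0)
    obtain ⟨hBkeys, hBgetD⟩ := pvBLoop_spec logd sk.reverse counts0 cand hcandnd
      (fun g hg => (PySem.Dict.contains_iff_mem_keys counts0 g).mpr (hc0keys ▸ hg))
    -- the two streak dicts are equal
    have hLen : ∀ x ds, pvLen sl x ds = pvLen logd x ds := by
      intro x ds
      unfold pvLen
      have hpred : (fun t => PySem.Str.isIn x (sl.getD t ""))
          = (fun t => PySem.Str.isIn x (logd.getD t "")) :=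
        funext (fun t => by rw [hslgetD t])
      rw [hpred]
    have hdicts : (cand.foldl (fun d g => pvAInner sl g d sk.reverse) d0)
        = pvBLoop logd counts0 cand sk.reverse := by
      apply PySem.Dict.ext
      rw [PySem.Dict.items_eq_map_keys _ (by rw [hAkeys]; exact hcandnd) 0,
        PySem.Dict.items_eq_map_keys _ (by rw [hBkeys, hc0keys]; exact hcandnd) 0]
      rw [hAkeys, hBkeys, hc0keys]
      have hfun : (fun k => (k, (cand.foldl (fun d g => pvAInner sl g d sk.reverse) d0).getD k 0))
          = (fun k => (k, (pvBLoop logd counts0 cand sk.reverse).getD k 0)) := by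
        funext k
        rw [hAgetD k, hBgetD k, hc0getD k, hd0getD k, hLen k]
        by_cases hk : k ∈ cand
        · simp [hk]
        · simp [hk]
      rw [hfun]
    rw [hd0keys, hdicts]

-- ===== VERDICT =====
theorem calculate_streak_spec : Claim_equal_calculate_streak := by
  intro log _ _
  show calculate_streak log = calculate_streak_alt log
  exact pvMainAux (PySem.Dict.ofList log) (PySem.Dict.nodup_keys_ofList log)
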